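-- pv_equiv track=rewrite | github.com/nh0317/Python_Coding_Test | 프로그래머스/lv3/92344. 파괴되지 않은 건물/파괴되지 않은 건물.py | solution
-- ===== SOURCE A (Python) =====
-- def make_filter(skill, m, n):
--     filters = [[0 for _ in range(m+1)] for _ in range(n+1)]
--
--     for t, r1, c1, r2, c2, degree in skill:
--         if t == 1:
--             degree *= -1
--
--         filters[r1][c1] += degree
--         filters[r1][c2+1] += degree * -1
--         filters[r2+1][c1] += degree * -1
--         filters[r2+1][c2+1] += degree
--
--     for i in range(len(filters)):
--         for j in range(1, len(filters[0])):
--             filters[i][j] += filters[i][j-1]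
--
--     for i in range(1, len(filters)):
--         for j in range(len(filters[0])):
--             filters[i][j] += filters[i-1][j]
--
--     return filters
--
-- def solution(board, skill):
--     answer = 0
--     filters = make_filter(skill, len(board[0]), len(board))
--     for i in range(len(board)):
--         for j in range(len(board[0])):
--             board[i][j] += filters[i][j]
--             if board[i][j] > 0:
--                 answer += 1
--
--     return answer
-- ===== SOURCE B (Python) =====
-- def solution(board, skill):
--     for t, r1, c1, r2, c2, degree in skill:
--         d = -degree if t == 1 else degree
--         for i in range(r1, r2 + 1):
--             for j in range(c1, c2 + 1):
--                 board[i][j] += d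
--     n, m = len(board), len(board[0])
--     return sum(1 for i in range(n) for j in range(m) if board[i][j] > 0)
-- ===== Notes on version B (the rewrite author's own statement) =====
-- stated objective: simpler
-- what changed: B drops the 2-D difference-array / double prefix-sum helper entirely and instead adds each skill's signed degree directly to every cell of its rectangle, then counts positive cells in one final pass.
-- outside the precondition, e.g. on solution([[1], [1]], [[0, 2, 0, 0, 0, 5]]): A returns 1, B returns 2; on solution([[1]], [[0, -1, 0, -1, 0, 5]]): A returns 0, B returns 1
import Mathlib
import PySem

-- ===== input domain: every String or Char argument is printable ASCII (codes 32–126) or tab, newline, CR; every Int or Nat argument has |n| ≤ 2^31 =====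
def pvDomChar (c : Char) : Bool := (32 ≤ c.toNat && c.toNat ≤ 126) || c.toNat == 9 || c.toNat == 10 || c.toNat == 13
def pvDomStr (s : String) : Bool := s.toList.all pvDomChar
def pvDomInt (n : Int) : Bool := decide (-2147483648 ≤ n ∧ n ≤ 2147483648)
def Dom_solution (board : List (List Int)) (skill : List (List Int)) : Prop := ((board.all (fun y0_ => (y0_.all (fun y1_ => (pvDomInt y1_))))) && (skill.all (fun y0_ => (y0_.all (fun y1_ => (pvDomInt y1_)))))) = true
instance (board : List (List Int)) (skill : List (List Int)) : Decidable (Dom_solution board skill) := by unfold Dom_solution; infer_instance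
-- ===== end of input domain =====

-- B replaces A's 2-D difference-array + double prefix-sum helper by directly adding each skill's
-- signed degree to every cell of its rectangle, then counting positive cells (objective: simpler).
-- Both Pythons mutate `board` in place identically; the equivalence proved here is about the return value.

-- ===== PORT A =====
-- filters[i][j] += d  (Python list indexing; in-range under Pre_)
def pvAddAt (g : List (List Int)) (i j d : Int) : List (List Int) :=
  let row := PySem.List.pyGetD g i []
  PySem.List.pySetD g i (PySem.List.pySetD row j (PySem.List.pyGetD row j 0 + d))

-- for j in range(1, len): filters[i][j] += filters[i][j-1]
def pvScanAux (prev : Int) : List Int → List Int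
  | [] => []
  | y :: ys => (y + prev) :: pvScanAux (y + prev) ys

def pvScanRow : List Int → List Int
  | [] => []
  | x :: xs => x :: pvScanAux x xs

-- for i in range(1, len): filters[i][j] += filters[i-1][j]
def pvColAux (prev : List Int) : List (List Int) → List (List Int)
  | [] => []
  | r :: rs => (List.zipWith (· + ·) r prev) :: pvColAux (List.zipWith (· + ·) r prev) rs

def pvColPass : List (List Int) → List (List Int)
  | [] => []
  | r :: rs => r :: pvColAux r rs

def pvMakeFilter (skill : List (List Int)) (m n : Nat) : List (List Int) :=
  let init : List (List Int) :=
    (List.range (n+1)).map (fun _ => (List.range (m+1)).map (fun _ => (0:Int)))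
  let f0 := skill.foldl (fun g s =>
    match s with
    | [t, r1, c1, r2, c2, degree] =>
      let d := if t == 1 then -degree else degree
      pvAddAt (pvAddAt (pvAddAt (pvAddAt g r1 c1 d) r1 (c2+1) (-d)) (r2+1) c1 (-d)) (r2+1) (c2+1) d
    | _ => g) init          -- a skill row not of length 6 raises in Python: outside Pre_
  pvColPass (f0.map pvScanRow)

def solution (board : List (List Int)) (skill : List (List Int)) : Int :=
  let n := board.length
  let m := (board.headD []).length     -- len(board[0]): raises on empty board, outside Pre_
  let filters := pvMakeFilter skill m n
  (PySem.List.pyRange 0 (n:Int) 1).foldl (fun acc i =>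
    (PySem.List.pyRange 0 (m:Int) 1).foldl (fun acc j =>
      if PySem.List.pyGetD (PySem.List.pyGetD board i []) j 0
         + PySem.List.pyGetD (PySem.List.pyGetD filters i []) j 0 > 0
      then acc + 1 else acc) acc) 0

-- ===== PORT B =====
-- board[i][j] += d
def pvBump (b : List (List Int)) (i j d : Int) : List (List Int) :=
  PySem.List.pySetD b i
    (PySem.List.pySetD (PySem.List.pyGetD b i []) j
      (PySem.List.pyGetD (PySem.List.pyGetD b i []) j 0 + d))

def pvAddRect (b : List (List Int)) (d r1 c1 r2 c2 : Int) : List (List Int) :=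
  (PySem.List.pyRange r1 (r2+1) 1).foldl (fun b i =>
    (PySem.List.pyRange c1 (c2+1) 1).foldl (fun b j => pvBump b i j d) b) b

def solution_alt (board : List (List Int)) (skill : List (List Int)) : Int :=
  let board' := skill.foldl (fun b s =>
    match s with
    | [t, r1, c1, r2, c2, degree] =>
      pvAddRect b (if t == 1 then -degree else degree) r1 c1 r2 c2
    | _ => b) board         -- a skill row not of length 6 raises in Python: outside Pre_
  let n := board'.length
  let m := (board'.headD []).length
  (PySem.List.pyRange 0 (n:Int) 1).foldl (fun acc i =>
    (PySem.List.pyRange 0 (m:Int) 1).foldl (fun acc j =>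
      if PySem.List.pyGetD (PySem.List.pyGetD board' i []) j 0 > 0
      then acc + 1 else acc) acc) 0

-- ===== PRECONDITION & SPEC =====
-- Pre_ excludes: the empty board and boards with a row shorter than row 0 (A raises IndexError),
-- skill rows not of length 6 (A raises ValueError), and skills whose rectangle coordinates are
-- negative, out of range or inverted (r1 > r2 or c1 > c2), where A's difference-array corner
-- arithmetic wraps negative indices or leaves accidental band effects while B's direct loops do
-- the natural thing (see the excluded examples in the claim).
def Pre_solution (board : List (List Int)) (skill : List (List Int)) : Prop :=
  board ≠ [] ∧
  (∀ row ∈ board, (board.headD []).length ≤ row.length) ∧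
  (∀ s ∈ skill, s.length = 6 ∧
     0 ≤ s.getD 1 0 ∧ s.getD 1 0 ≤ s.getD 3 0 ∧ s.getD 3 0 < (board.length : Int) ∧
     0 ≤ s.getD 2 0 ∧ s.getD 2 0 ≤ s.getD 4 0 ∧ s.getD 4 0 < ((board.headD []).length : Int))

instance (board : List (List Int)) (skill : List (List Int)) : Decidable (Pre_solution board skill) := by
  unfold Pre_solution; infer_instance

def pvWitness_solution : List (List Int) × List (List Int) :=
  ([[1, -2], [0, 3]], [[0, 0, 0, 1, 1, 2], [1, 0, 1, 1, 1, 1]])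

def Spec_solution (board : List (List Int)) (skill : List (List Int)) (out : Int) : Prop := out = solution_alt board skill
instance (board : List (List Int)) (skill : List (List Int)) (out : Int) : Decidable (Spec_solution board skill out) := by unfold Spec_solution; infer_instance

-- ===== CLAIM (what is proved, stated in full; the proofs are below) =====
def Claim_equal_solution : Prop := ∀ (board : List (List Int)) (skill : List (List Int)), Dom_solution board skill → Pre_solution board skill → Spec_solution board skill (solution board skill)

-- ===== LEMMAS AND PROOFS =====

-- cell read, Nat indices (0 beyond bounds)
def pvGN (g : List (List Int)) (i j : Nat) : Int := (g.getD i []).getD j 0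

-- per-skill per-cell effect, as B produces it
def pvContrib (s : List Int) (i j : Nat) : Int :=
  match s with
  | [t, r1, c1, r2, c2, degree] =>
    if r1 ≤ (i:Int) ∧ (i:Int) ≤ r2 ∧ c1 ≤ (j:Int) ∧ (j:Int) ≤ c2 then
      (if t == 1 then -degree else degree) else 0
  | _ => 0

def pvTotal (skill : List (List Int)) (i j : Nat) : Int :=
  (skill.map (fun s => pvContrib s i j)).sum

-- per-skill per-cell effect on A's difference array
def pvDelta (s : List Int) (i j : Nat) : Int :=
  match s with
  | [t, r1, c1, r2, c2, degree] =>
    let d := if t == 1 then -degree else degree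
    (if (i:Int) = r1 ∧ (j:Int) = c1 then d else 0)
    + (if (i:Int) = r1 ∧ (j:Int) = c2 + 1 then -d else 0)
    + (if (i:Int) = r2 + 1 ∧ (j:Int) = c1 then -d else 0)
    + (if (i:Int) = r2 + 1 ∧ (j:Int) = c2 + 1 then d else 0)
  | _ => 0

def pvDTotal (skill : List (List Int)) (i j : Nat) : Int :=
  (skill.map (fun s => pvDelta s i j)).sum

def pvWf (n m : Nat) (s : List Int) : Prop :=
  s.length = 6 ∧
  0 ≤ s.getD 1 0 ∧ s.getD 1 0 ≤ s.getD 3 0 ∧ s.getD 3 0 < (n:Int) ∧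
  0 ≤ s.getD 2 0 ∧ s.getD 2 0 ≤ s.getD 4 0 ∧ s.getD 4 0 < (m:Int)

lemma pyGetD_nonneg {α : Type} (xs : List α) (i : Int) (d : α) (h : 0 ≤ i) :
    PySem.List.pyGetD xs i d = xs.getD i.toNat d := by
  obtain ⟨k, rfl⟩ := Int.eq_ofNat_of_zero_le h
  simp

lemma getD_set_self {α : Type} (l : List α) (k : Nat) (v d : α) (hk : k < l.length) :
    (l.set k v).getD k d = v := by
  simp [List.getD_eq_getElem?_getD, hk]

lemma getD_set_ne {α : Type} (l : List α) (k m : Nat) (v d : α) (h : m ≠ k) :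
    (l.set k v).getD m d = l.getD m d := by
  simp [List.getD_eq_getElem?_getD, List.getElem?_set_ne, Ne.symm h]

lemma pvAddAt_eq (g : List (List Int)) (a b d : Int) (ha : 0 ≤ a) (hb : 0 ≤ b) :
    pvAddAt g a b d
      = g.set a.toNat ((g.getD a.toNat []).set b.toNat ((g.getD a.toNat []).getD b.toNat 0 + d)) := by
  simp [pvAddAt, PySem.List.pySetD_of_nonneg _ _ ha, PySem.List.pySetD_of_nonneg _ _ hb,
    pyGetD_nonneg _ _ _ ha, pyGetD_nonneg _ _ _ hb]

lemma pvAddAt_length (g : List (List Int)) (a b d : Int) :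
    (pvAddAt g a b d).length = g.length := by
  simp [pvAddAt, PySem.List.length_pySetD]

lemma pvAddAt_rowlen (g : List (List Int)) (a b d : Int) (ha : 0 ≤ a) (hb : 0 ≤ b) (k : Nat) :
    ((pvAddAt g a b d).getD k []).length = (g.getD k []).length := by
  rw [pvAddAt_eq g a b d ha hb]
  by_cases hk : k = a.toNat
  · subst hk
    by_cases hlt : a.toNat < g.length
    · rw [getD_set_self _ _ _ _ hlt]; simp
    · rw [List.set_eq_of_length_le (by omega)]
  · rw [getD_set_ne _ _ _ _ _ hk]

lemma pvGN_pvAddAt (g : List (List Int)) (a b d : Int) (ha : 0 ≤ a) (hb : 0 ≤ b)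
    (ha2 : a < (g.length : Int)) (hb2 : b < ((g.getD a.toNat []).length : Int)) (i j : Nat) :
    pvGN (pvAddAt g a b d) i j
      = pvGN g i j + (if (i:Int) = a ∧ (j:Int) = b then d else 0) := by
  rw [pvAddAt_eq g a b d ha hb]
  unfold pvGN
  by_cases hi : i = a.toNat
  · subst hi
    rw [getD_set_self _ _ _ _ (by omega)]
    by_cases hj : j = b.toNat
    · subst hj
      rw [getD_set_self _ _ _ _ (by omega)]
      rw [if_pos (show ((a.toNat:Int) = a ∧ ((b.toNat:Int) = b)) by omega)]
    · rw [getD_set_ne _ _ _ _ _ hj]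
      have : ¬ ((j:Int) = b) := by omega
      simp [this]
  · rw [getD_set_ne _ _ _ _ _ hi]
    have : ¬ ((i:Int) = a) := by omega
    simp [this]

def pvGrid (n m : Nat) (g : List (List Int)) : Prop :=
  g.length = n ∧ ∀ k : Nat, k < n → (g.getD k []).length = m

lemma pvGrid_pvAddAt (n m : Nat) (g : List (List Int)) (a b d : Int) (ha : 0 ≤ a) (hb : 0 ≤ b)
    (h : pvGrid n m g) : pvGrid n m (pvAddAt g a b d) := by
  refine ⟨by rw [pvAddAt_length]; exact h.1, fun k hk => ?_⟩
  rw [pvAddAt_rowlen _ _ _ _ ha hb]; exact h.2 k hk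

lemma pvGN_pvAddAt_grid (n m : Nat) (g : List (List Int)) (hg : pvGrid (n+1) (m+1) g)
    (a b d : Int) (ha : 0 ≤ a) (ha' : a ≤ (n:Int)) (hb : 0 ≤ b) (hb' : b ≤ (m:Int)) (i j : Nat) :
    pvGN (pvAddAt g a b d) i j
      = pvGN g i j + (if (i:Int) = a ∧ (j:Int) = b then d else 0) := by
  apply pvGN_pvAddAt _ _ _ _ ha hb
  · rw [hg.1]; push_cast; omega
  · rw [hg.2 a.toNat (by omega)]; push_cast; omega

def pvInit (n m : Nat) : List (List Int) :=
  (List.range (n+1)).map (fun _ => (List.range (m+1)).map (fun _ => (0:Int)))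

lemma pvInit_grid (n m : Nat) : pvGrid (n+1) (m+1) (pvInit n m) := by
  refine ⟨by simp [pvInit], fun k hk => ?_⟩
  simp [pvInit, List.getD_eq_getElem?_getD, hk]

lemma pvInit_gn (n m i j : Nat) : pvGN (pvInit n m) i j = 0 := by
  unfold pvGN pvInit
  by_cases hi : i < n+1
  · by_cases hj : j < m+1 <;> simp [List.getD_eq_getElem?_getD, hi, hj]
  · simp [List.getD_eq_getElem?_getD, hi]

def pvStepA (g : List (List Int)) (s : List Int) : List (List Int) :=
  match s with
  | [t, r1, c1, r2, c2, degree] =>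
    let d := if t == 1 then -degree else degree
    pvAddAt (pvAddAt (pvAddAt (pvAddAt g r1 c1 d) r1 (c2+1) (-d)) (r2+1) c1 (-d)) (r2+1) (c2+1) d
  | _ => g

lemma pvStepA_grid (n m : Nat) (g : List (List Int)) (s : List Int)
    (hwf : pvWf n m s) (hg : pvGrid (n+1) (m+1) g) : pvGrid (n+1) (m+1) (pvStepA g s) := by
  rcases s with _ | ⟨t, _ | ⟨r1, _ | ⟨c1, _ | ⟨r2, _ | ⟨c2, _ | ⟨dg, _ | ⟨x, rest⟩⟩⟩⟩⟩⟩⟩ <;>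
    simp [pvWf] at hwf
  obtain ⟨h1, h2, h3, h4, h5, h6⟩ := hwf
  simp only [pvStepA]
  apply pvGrid_pvAddAt _ _ _ _ _ _ (by omega) (by omega)
  apply pvGrid_pvAddAt _ _ _ _ _ _ (by omega) (by omega)
  apply pvGrid_pvAddAt _ _ _ _ _ _ (by omega) (by omega)
  exact pvGrid_pvAddAt _ _ _ _ _ _ (by omega) (by omega) hg

lemma pvStepA_gn (n m : Nat) (g : List (List Int)) (s : List Int)
    (hwf : pvWf n m s) (hg : pvGrid (n+1) (m+1) g) (i j : Nat) :
    pvGN (pvStepA g s) i j = pvGN g i j + pvDelta s i j := by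
  rcases s with _ | ⟨t, _ | ⟨r1, _ | ⟨c1, _ | ⟨r2, _ | ⟨c2, _ | ⟨dg, _ | ⟨x, rest⟩⟩⟩⟩⟩⟩⟩ <;>
    simp [pvWf] at hwf
  obtain ⟨h1, h2, h3, h4, h5, h6⟩ := hwf
  have hg1 := pvGrid_pvAddAt (n+1) (m+1) g r1 c1 (if t == 1 then -dg else dg) (by omega) (by omega) hg
  have hg2 := pvGrid_pvAddAt (n+1) (m+1) _ r1 (c2+1) (-(if t == 1 then -dg else dg)) (by omega) (by omega) hg1
  have hg3 := pvGrid_pvAddAt (n+1) (m+1) _ (r2+1) c1 (-(if t == 1 then -dg else dg)) (by omega) (by omega) hg2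
  simp only [pvStepA]
  rw [pvGN_pvAddAt_grid n m _ hg3 _ _ _ (by omega) (by omega) (by omega) (by omega)]
  rw [pvGN_pvAddAt_grid n m _ hg2 _ _ _ (by omega) (by omega) (by omega) (by omega)]
  rw [pvGN_pvAddAt_grid n m _ hg1 _ _ _ (by omega) (by omega) (by omega) (by omega)]
  rw [pvGN_pvAddAt_grid n m _ hg _ _ _ (by omega) (by omega) (by omega) (by omega)]
  simp only [pvDelta]
  ring

lemma pvFoldA_facts (n m : Nat) : ∀ (skill : List (List Int)) (g : List (List Int)),
    (∀ s ∈ skill, pvWf n m s) → pvGrid (n+1) (m+1) g →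
    pvGrid (n+1) (m+1) (skill.foldl pvStepA g)
    ∧ ∀ i j : Nat, pvGN (skill.foldl pvStepA g) i j = pvGN g i j + pvDTotal skill i j := by
  intro skill
  induction skill with
  | nil => intro g _ hg; exact ⟨hg, fun i j => by simp [pvDTotal]⟩
  | cons s rest ih =>
    intro g hwf hg
    have hs := hwf s (by simp)
    have hrest : ∀ s' ∈ rest, pvWf n m s' := fun s' hm => hwf s' (by simp [hm])
    have hg1 := pvStepA_grid n m g s hs hg
    obtain ⟨hga, hgn⟩ := ih (pvStepA g s) hrest hg1
    refine ⟨hga, fun i j => ?_⟩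
    rw [List.foldl_cons, hgn i j, pvStepA_gn n m g s hs hg i j]
    simp [pvDTotal]; ring

lemma pvScanAux_length (prev : Int) (xs : List Int) : (pvScanAux prev xs).length = xs.length := by
  induction xs generalizing prev with
  | nil => rfl
  | cons y ys ih => simp [pvScanAux, ih]

lemma pvScanRow_length (row : List Int) : (pvScanRow row).length = row.length := by
  cases row with
  | nil => rfl
  | cons x xs => simp [pvScanRow, pvScanAux_length]

lemma pvScanAux_getD (xs : List Int) : ∀ (prev : Int) (j : Nat), j < xs.length →
    (pvScanAux prev xs).getD j 0 = prev + ∑ k ∈ Finset.range (j+1), xs.getD k 0 := by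
  induction xs with
  | nil => intro prev j hj; simp at hj
  | cons y ys ih =>
    intro prev j hj
    cases j with
    | zero => simp [pvScanAux]; ring
    | succ j =>
      rw [show pvScanAux prev (y :: ys) = (y + prev) :: pvScanAux (y + prev) ys from rfl]
      rw [List.getD_cons_succ, ih (y + prev) j (by simpa using hj)]
      rw [Finset.sum_range_succ' (fun k => (y :: ys).getD k 0)]
      simp
      ring

lemma pvScanRow_getD (row : List Int) (j : Nat) (hj : j < row.length) :
    (pvScanRow row).getD j 0 = ∑ k ∈ Finset.range (j+1), row.getD k 0 := by
  cases row with
  | nil => simp at hj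
  | cons x xs =>
    cases j with
    | zero => simp [pvScanRow]
    | succ j =>
      rw [show pvScanRow (x :: xs) = x :: pvScanAux x xs from rfl]
      rw [List.getD_cons_succ, pvScanAux_getD xs x j (by simpa using hj)]
      rw [Finset.sum_range_succ' (fun k => (x :: xs).getD k 0)]
      simp
      ring

lemma pvZipAdd_getD (r p : List Int) (h : r.length = p.length) (j : Nat) :
    (List.zipWith (· + ·) r p).getD j 0 = r.getD j 0 + p.getD j 0 := by
  induction r generalizing p j with
  | nil => cases p with
    | nil => simp
    | cons b bs => simp at h
  | cons a as ih =>
    cases p with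
    | nil => simp at h
    | cons b bs =>
      cases j with
      | zero => simp
      | succ j => simpa using ih bs (by simpa using h) j

lemma pvColAux_getD (M : Nat) (rs : List (List Int)) :
    ∀ (prev : List Int), (∀ k : Nat, k < rs.length → (rs.getD k []).length = M) →
    prev.length = M → ∀ (i j : Nat), i < rs.length →
    ((pvColAux prev rs).getD i []).getD j 0
      = prev.getD j 0 + ∑ k ∈ Finset.range (i+1), ((rs.getD k []).getD j 0) := by
  induction rs with
  | nil => intro prev _ _ i j hi; simp at hi
  | cons r t ih =>
    intro prev hlen hp i j hi
    have hr : r.length = M := by simpa using hlen 0 (by simp)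
    have hq : (List.zipWith (· + ·) r prev).length = M := by simp [hr, hp]
    cases i with
    | zero =>
      simp only [pvColAux, List.getD_cons_zero]
      rw [pvZipAdd_getD r prev (by omega), Finset.sum_range_one]
      simp
      ring
    | succ i =>
      simp only [pvColAux, List.getD_cons_succ]
      rw [ih (List.zipWith (· + ·) r prev)
            (fun k hk => by simpa using hlen (k+1) (by simpa using hk)) hq i j (by simpa using hi)]
      rw [pvZipAdd_getD r prev (by omega)]
      rw [Finset.sum_range_succ' (fun k => (((r :: t).getD k []).getD j 0)) (i+1)]
      simp
      ring

lemma pvColPass_getD (M : Nat) (g : List (List Int))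
    (hlen : ∀ k : Nat, k < g.length → (g.getD k []).length = M)
    (i j : Nat) (hi : i < g.length) :
    pvGN (pvColPass g) i j = ∑ k ∈ Finset.range (i+1), pvGN g k j := by
  cases g with
  | nil => simp at hi
  | cons r t =>
    cases i with
    | zero => simp [pvColPass, pvGN]
    | succ i =>
      have hr : r.length = M := by simpa using hlen 0 (by simp)
      unfold pvGN
      rw [show pvColPass (r :: t) = r :: pvColAux r t from rfl, List.getD_cons_succ]
      rw [pvColAux_getD M t r (fun k hk => by simpa using hlen (k+1) (by simpa using hk)) hr
            i j (by simpa using hi)]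
      rw [Finset.sum_range_succ' (fun k => (((r :: t).getD k []).getD j 0)) (i+1)]
      simp
      ring

lemma pvSum_exchange {α : Type} (s : Finset Nat) (l : List α) (f : Nat → α → Int) :
    ∑ x ∈ s, (l.map (f x)).sum = (l.map (fun a => ∑ x ∈ s, f x a)).sum := by
  induction l with
  | nil => simp
  | cons a t ih => simp [Finset.sum_add_distrib, ih]

lemma pvSum_ind (i : Nat) (a v : Int) (ha : 0 ≤ a) :
    ∑ i' ∈ Finset.range (i+1), (if (i':Int) = a then v else 0)
      = if a ≤ (i:Int) then v else 0 := by
  have h : ∀ i' : Nat, (if (i':Int) = a then v else 0) = (if i' = a.toNat then v else 0) :=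
    fun i' => if_congr (by omega) rfl rfl
  rw [Finset.sum_congr rfl (fun i' _ => h i')]
  rw [Finset.sum_ite_eq' (Finset.range (i+1)) a.toNat (fun _ => v)]
  simp only [Finset.mem_range]
  exact if_congr (by omega) rfl rfl

lemma pvSum_point (i j : Nat) (a b v : Int) (ha : 0 ≤ a) (hb : 0 ≤ b) :
    ∑ i' ∈ Finset.range (i+1), ∑ j' ∈ Finset.range (j+1),
        (if (i':Int) = a ∧ (j':Int) = b then v else 0)
      = if a ≤ (i:Int) ∧ b ≤ (j:Int) then v else 0 := by
  have inner : ∀ i' : Nat,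
      ∑ j' ∈ Finset.range (j+1), (if (i':Int) = a ∧ (j':Int) = b then v else 0)
        = if (i':Int) = a then (if b ≤ (j:Int) then v else 0) else 0 := by
    intro i'
    by_cases hi' : (i':Int) = a
    · simp only [hi', true_and, if_true]
      exact pvSum_ind j b v hb
    · simp [hi']
  rw [Finset.sum_congr rfl (fun i' _ => inner i')]
  rw [pvSum_ind i a _ ha]
  by_cases h1 : a ≤ (i:Int) <;> by_cases h2 : b ≤ (j:Int) <;> simp [h1, h2]

lemma pvDelta_box (n m : Nat) (s : List Int) (hwf : pvWf n m s) (i j : Nat) :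
    ∑ i' ∈ Finset.range (i+1), ∑ j' ∈ Finset.range (j+1), pvDelta s i' j'
      = pvContrib s i j := by
  rcases s with _ | ⟨t, _ | ⟨r1, _ | ⟨c1, _ | ⟨r2, _ | ⟨c2, _ | ⟨dg, _ | ⟨x, rest⟩⟩⟩⟩⟩⟩⟩ <;>
    simp [pvWf] at hwf
  obtain ⟨h1, h2, h3, h4, h5, h6⟩ := hwf
  simp only [pvDelta, pvContrib, Finset.sum_add_distrib]
  rw [pvSum_point i j r1 c1 _ (by omega) (by omega)]
  rw [pvSum_point i j r1 (c2+1) _ (by omega) (by omega)]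
  rw [pvSum_point i j (r2+1) c1 _ (by omega) (by omega)]
  rw [pvSum_point i j (r2+1) (c2+1) _ (by omega) (by omega)]
  split_ifs <;> omega

lemma pvMapScan_getD (g : List (List Int)) (i : Nat) :
    (g.map pvScanRow).getD i [] = pvScanRow (g.getD i []) := by
  by_cases hi : i < g.length
  · simp [List.getD_eq_getElem?_getD, List.getElem?_eq_getElem hi]
  · have h1 : g[i]? = none := by rw [List.getElem?_eq_none_iff]; omega
    have h2 : (g.map pvScanRow)[i]? = none := by
      rw [List.getElem?_eq_none_iff]; simpa using (by omega : g.length ≤ i)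
    simp [List.getD_eq_getElem?_getD, h1, h2, pvScanRow]

lemma pvMakeFilter_gn (n m : Nat) (skill : List (List Int)) (hwf : ∀ s ∈ skill, pvWf n m s)
    (i j : Nat) (hi : i < n) (hj : j < m) :
    pvGN (pvMakeFilter skill m n) i j = pvTotal skill i j := by
  obtain ⟨hgrid, hgn⟩ := pvFoldA_facts n m skill (pvInit n m) hwf (pvInit_grid n m)
  have hMF : pvMakeFilter skill m n
      = pvColPass ((skill.foldl pvStepA (pvInit n m)).map pvScanRow) := rfl
  set f0 := skill.foldl pvStepA (pvInit n m) with hf0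
  have hlen : ∀ k : Nat, k < (f0.map pvScanRow).length →
      ((f0.map pvScanRow).getD k []).length = m+1 := by
    intro k hk
    rw [pvMapScan_getD, pvScanRow_length]
    exact hgrid.2 k (by simpa [hgrid.1] using hk)
  rw [hMF, pvColPass_getD (m+1) _ hlen i j (by simp [hgrid.1]; omega)]
  have hrow : ∀ k : Nat, k < n →
      pvGN (f0.map pvScanRow) k j = ∑ j' ∈ Finset.range (j+1), pvGN f0 k j' := by
    intro k hk
    unfold pvGN
    rw [pvMapScan_getD]
    exact pvScanRow_getD _ j (by rw [hgrid.2 k (by omega)]; omega)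
  rw [Finset.sum_congr rfl (fun k hk => hrow k (by have := Finset.mem_range.mp hk; omega))]
  have hf0gn : ∀ i' j' : Nat, pvGN f0 i' j' = pvDTotal skill i' j' := by
    intro i' j'; rw [hgn i' j', pvInit_gn]; ring
  rw [Finset.sum_congr rfl (fun i' _ => Finset.sum_congr rfl (fun j' _ => hf0gn i' j'))]
  unfold pvDTotal pvTotal
  rw [Finset.sum_congr rfl
        (fun i' _ => pvSum_exchange (Finset.range (j+1)) skill (fun j' s => pvDelta s i' j'))]
  rw [pvSum_exchange (Finset.range (i+1)) skill
        (fun i' s => ∑ j' ∈ Finset.range (j+1), pvDelta s i' j')]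
  exact congrArg List.sum (List.map_congr_left (fun s hs => pvDelta_box n m s (hwf s hs) i j))

def pvShape (g0 g : List (List Int)) : Prop :=
  g.length = g0.length ∧ ∀ k : Nat, (g.getD k []).length = (g0.getD k []).length

lemma pvBump_eq (b : List (List Int)) (i j d : Int) : pvBump b i j d = pvAddAt b i j d := rfl

lemma pvShape_pvAddAt (g0 g : List (List Int)) (a b d : Int) (ha : 0 ≤ a) (hb : 0 ≤ b)
    (h : pvShape g0 g) : pvShape g0 (pvAddAt g a b d) :=
  ⟨by rw [pvAddAt_length]; exact h.1,
   fun k => by rw [pvAddAt_rowlen _ _ _ _ ha hb]; exact h.2 k⟩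

lemma pvColsFold (g0 : List (List Int)) (d i : Int) (hi0 : 0 ≤ i) (hiR : i < (g0.length:Int)) :
    ∀ (L : List Int) (b : List (List Int)), pvShape g0 b → L.Nodup →
    (∀ x ∈ L, 0 ≤ x ∧ x < ((g0.getD i.toNat []).length : Int)) →
    pvShape g0 (L.foldl (fun b j => pvBump b i j d) b) ∧
    ∀ x y : Nat, pvGN (L.foldl (fun b j => pvBump b i j d) b) x y
      = pvGN b x y + (if (x:Int) = i ∧ (y:Int) ∈ L then d else 0) := by
  intro L
  induction L with
  | nil => intro b hs _ _; exact ⟨hs, fun x y => by simp⟩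
  | cons jc t ih =>
    intro b hs hnd hb
    have hj := hb jc (by simp)
    have hs1 : pvShape g0 (pvBump b i jc d) := by
      rw [pvBump_eq]; exact pvShape_pvAddAt _ _ _ _ _ hi0 hj.1 hs
    have hgn1 : ∀ x y : Nat, pvGN (pvBump b i jc d) x y
        = pvGN b x y + (if (x:Int) = i ∧ (y:Int) = jc then d else 0) := by
      intro x y
      rw [pvBump_eq]
      apply pvGN_pvAddAt _ _ _ _ hi0 hj.1
      · rw [hs.1]; exact hiR
      · rw [hs.2 i.toNat]; exact hj.2
    obtain ⟨hsf, hgnf⟩ := ih (pvBump b i jc d) hs1 (List.nodup_cons.mp hnd).2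
      (fun x hx => hb x (by simp [hx]))
    refine ⟨hsf, fun x y => ?_⟩
    rw [List.foldl_cons, hgnf x y, hgn1 x y]
    have hjt : jc ∉ t := (List.nodup_cons.mp hnd).1
    by_cases hx : (x:Int) = i
    · by_cases hyj : (y:Int) = jc
      · rw [if_pos ⟨hx, hyj⟩, if_neg (fun h => hjt (hyj ▸ h.2)),
            if_pos ⟨hx, List.mem_cons.mpr (Or.inl hyj)⟩]
        ring
      · by_cases hyt : (y:Int) ∈ t
        · rw [if_neg (fun h => hyj h.2), if_pos ⟨hx, hyt⟩,
              if_pos ⟨hx, List.mem_cons.mpr (Or.inr hyt)⟩]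
          ring
        · rw [if_neg (fun h => hyj h.2), if_neg (fun h => hyt h.2),
              if_neg (fun h => (List.mem_cons.mp h.2).elim hyj hyt)]
          ring
    · rw [if_neg (fun h => hx h.1), if_neg (fun h => hx h.1), if_neg (fun h => hx h.1)]
      ring

lemma pvRowsFold (g0 : List (List Int)) (d c1 c2 : Int) (hc1 : 0 ≤ c1) :
    ∀ (Li : List Int) (b : List (List Int)), pvShape g0 b → Li.Nodup →
    (∀ i ∈ Li, 0 ≤ i ∧ i < (g0.length:Int) ∧ c2 < ((g0.getD i.toNat []).length : Int)) →
    pvShape g0 (Li.foldl (fun b i =>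
        (PySem.List.pyRange c1 (c2+1) 1).foldl (fun b j => pvBump b i j d) b) b) ∧
    ∀ x y : Nat, pvGN (Li.foldl (fun b i =>
        (PySem.List.pyRange c1 (c2+1) 1).foldl (fun b j => pvBump b i j d) b) b) x y
      = pvGN b x y + (if (x:Int) ∈ Li ∧ c1 ≤ (y:Int) ∧ (y:Int) ≤ c2 then d else 0) := by
  intro Li
  induction Li with
  | nil => intro b hs _ _; exact ⟨hs, fun x y => by simp⟩
  | cons ic t ih =>
    intro b hs hnd hb
    have hi := hb ic (by simp)
    obtain ⟨hs1, hgn1⟩ := pvColsFold g0 d ic hi.1 hi.2.1 (PySem.List.pyRange c1 (c2+1) 1) b hs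
      (PySem.List.nodup_pyRange_one _ _)
      (fun x hx => by
        have := PySem.List.mem_pyRange_one.mp hx
        exact ⟨by omega, by have := hi.2.2; omega⟩)
    obtain ⟨hsf, hgnf⟩ := ih _ hs1 (List.nodup_cons.mp hnd).2 (fun i hi' => hb i (by simp [hi']))
    refine ⟨hsf, fun x y => ?_⟩
    rw [List.foldl_cons, hgnf x y, hgn1 x y]
    have hit : ic ∉ t := (List.nodup_cons.mp hnd).1
    simp only [PySem.List.mem_pyRange_one, List.mem_cons]
    by_cases hx : (x:Int) = ic
    · have hxt : ¬ ((x:Int) ∈ t) := fun h => hit (hx ▸ h)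
      by_cases hy : c1 ≤ (y:Int) ∧ (y:Int) ≤ c2
      · rw [if_pos ⟨hx, hy.1, by omega⟩, if_neg (fun h => hxt h.1),
            if_pos ⟨Or.inl hx, hy.1, hy.2⟩]
        ring
      · rw [if_neg (fun h => hy ⟨h.2.1, by omega⟩), if_neg (fun h => hxt h.1),
            if_neg (fun h => hy ⟨h.2.1, h.2.2⟩)]
        ring
    · by_cases hxt : (x:Int) ∈ t
      · by_cases hy : c1 ≤ (y:Int) ∧ (y:Int) ≤ c2
        · rw [if_neg (fun h => hx h.1), if_pos ⟨hxt, hy.1, hy.2⟩,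
              if_pos ⟨Or.inr hxt, hy.1, hy.2⟩]
          ring
        · rw [if_neg (fun h => hy ⟨h.2.1, by omega⟩), if_neg (fun h => hy ⟨h.2.1, h.2.2⟩),
              if_neg (fun h => hy ⟨h.2.1, h.2.2⟩)]
          ring
      · rw [if_neg (fun h => hx h.1), if_neg (fun h => hxt h.1),
            if_neg (fun h => h.1.elim hx hxt)]
        ring

def pvStepB (b : List (List Int)) (s : List Int) : List (List Int) :=
  match s with
  | [t, r1, c1, r2, c2, degree] =>
    pvAddRect b (if t == 1 then -degree else degree) r1 c1 r2 c2
  | _ => b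

lemma pvFoldB_facts (n m : Nat) (board : List (List Int)) (hbl : board.length = n)
    (hrows : ∀ k : Nat, k < n → m ≤ (board.getD k []).length) :
    ∀ (skill : List (List Int)) (b : List (List Int)), (∀ s ∈ skill, pvWf n m s) →
    pvShape board b →
    pvShape board (skill.foldl pvStepB b) ∧
    ∀ x y : Nat, pvGN (skill.foldl pvStepB b) x y = pvGN b x y + pvTotal skill x y := by
  intro skill
  induction skill with
  | nil => intro b _ hs; exact ⟨hs, fun x y => by simp [pvTotal]⟩
  | cons s t ih =>
    intro b hwf hs
    have hws := hwf s (by simp)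
    have hstep : pvShape board (pvStepB b s) ∧
        ∀ x y : Nat, pvGN (pvStepB b s) x y = pvGN b x y + pvContrib s x y := by
      rcases s with _ | ⟨t1, _ | ⟨r1, _ | ⟨c1, _ | ⟨r2, _ | ⟨c2, _ | ⟨dg, _ | ⟨z, rest⟩⟩⟩⟩⟩⟩⟩ <;>
        simp [pvWf] at hws
      obtain ⟨h1, h2, h3, h4, h5, h6⟩ := hws
      obtain ⟨hsf, hgnf⟩ := pvRowsFold board (if t1 == 1 then -dg else dg) c1 c2 (by omega)
        (PySem.List.pyRange r1 (r2+1) 1) b hs (PySem.List.nodup_pyRange_one _ _)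
        (fun i hi => by
          have hmem := PySem.List.mem_pyRange_one.mp hi
          refine ⟨by omega, by rw [hbl]; omega, ?_⟩
          have hr := hrows i.toNat (by omega)
          omega)
      refine ⟨hsf, fun x y => ?_⟩
      rw [show pvStepB b [t1, r1, c1, r2, c2, dg]
            = (PySem.List.pyRange r1 (r2+1) 1).foldl (fun b i =>
                (PySem.List.pyRange c1 (c2+1) 1).foldl
                  (fun b j => pvBump b i j (if t1 == 1 then -dg else dg)) b) b from rfl]
      rw [hgnf x y]
      simp only [pvContrib, PySem.List.mem_pyRange_one]
      by_cases hc : r1 ≤ (x:Int) ∧ (x:Int) < r2 + 1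
      · by_cases hc2 : r1 ≤ (x:Int) ∧ (x:Int) ≤ r2 ∧ c1 ≤ (y:Int) ∧ (y:Int) ≤ c2 <;>
          · split_ifs <;> omega
      · by_cases hc2 : r1 ≤ (x:Int) ∧ (x:Int) ≤ r2 ∧ c1 ≤ (y:Int) ∧ (y:Int) ≤ c2 <;>
          · split_ifs <;> omega
    obtain ⟨hsf, hgnf⟩ := ih (pvStepB b s) (fun s' hs' => hwf s' (by simp [hs'])) hstep.1
    refine ⟨hsf, fun x y => ?_⟩
    rw [List.foldl_cons, hgnf x y, hstep.2 x y]
    simp [pvTotal]; ring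

lemma pvHeadD_eq_getD {α : Type} (l : List α) (d : α) : l.headD d = l.getD 0 d := by
  cases l <;> rfl

-- ===== VERDICT (by name: the statement is the Claim_ definition above) =====
theorem solution_spec : Claim_equal_solution := by
  unfold Claim_equal_solution
  intro board skill _ hpre
  unfold Spec_solution
  obtain ⟨hne, hrows, hsk⟩ := hpre
  have hwf : ∀ s ∈ skill, pvWf board.length (board.headD []).length s := fun s hs => hsk s hs
  have hrowsD : ∀ k : Nat, k < board.length → (board.headD []).length ≤ (board.getD k []).length := by
    intro k hk
    have hmem : board.getD k [] ∈ board := by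
      rw [List.getD_eq_getElem?_getD, List.getElem?_eq_getElem hk]
      exact List.getElem_mem hk
    exact hrows _ hmem
  obtain ⟨hshape, hgnB⟩ := pvFoldB_facts board.length (board.headD []).length board rfl hrowsD
    skill board hwf ⟨rfl, fun _ => rfl⟩
  have hAr : solution board skill
      = (PySem.List.pyRange 0 (board.length:Int) 1).foldl (fun acc i =>
          (PySem.List.pyRange 0 ((board.headD []).length:Int) 1).foldl (fun acc j =>
            if PySem.List.pyGetD (PySem.List.pyGetD board i []) j 0
               + PySem.List.pyGetD (PySem.List.pyGetD
                   (pvMakeFilter skill (board.headD []).length board.length) i []) j 0 > 0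
            then acc + 1 else acc) acc) 0 := rfl
  have hBr : solution_alt board skill
      = (PySem.List.pyRange 0 ((skill.foldl pvStepB board).length:Int) 1).foldl (fun acc i =>
          (PySem.List.pyRange 0 (((skill.foldl pvStepB board).headD []).length:Int) 1).foldl (fun acc j =>
            if PySem.List.pyGetD (PySem.List.pyGetD (skill.foldl pvStepB board) i []) j 0 > 0
            then acc + 1 else acc) acc) 0 := rfl
  have hlen' : (skill.foldl pvStepB board).length = board.length := hshape.1
  have hm' : ((skill.foldl pvStepB board).headD []).length = (board.headD []).length := by
    rw [pvHeadD_eq_getD, pvHeadD_eq_getD]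
    exact hshape.2 0
  rw [hAr, hBr, hlen', hm']
  refine (PySem.List.foldl_congr_mem _ _ _ _ ?_).symm
  intro acc i hi
  refine PySem.List.foldl_congr_mem _ _ _ _ ?_
  intro acc' j hj
  have hi0 := PySem.List.mem_pyRange_one.mp hi
  have hj0 := PySem.List.mem_pyRange_one.mp hj
  simp only [pyGetD_nonneg _ _ _ hi0.1, pyGetD_nonneg _ _ _ hj0.1]
  have key : ((skill.foldl pvStepB board).getD i.toNat []).getD j.toNat 0
      = (board.getD i.toNat []).getD j.toNat 0
        + ((pvMakeFilter skill (board.headD []).length board.length).getD i.toNat []).getD j.toNat 0 := by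
    have h1 := hgnB i.toNat j.toNat
    have h2 := pvMakeFilter_gn board.length (board.headD []).length skill hwf i.toNat j.toNat
      (by omega) (by omega)
    unfold pvGN at h1 h2
    rw [h1, h2]
  rw [key]
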